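-- pv_equiv track=rewrite | github.com/kappa1312/kappa | src/conflict/merge_engine.py | _extract_imports_py
-- ===== SOURCE A (Python) =====
-- def _extract_imports_py(content: str) -> tuple[list[str], str]:
--     """Extract import statements from Python."""
--     lines = content.split("\n")
--     imports = []
--     body_lines = []
--     in_imports = True
--
--     for line in lines:
--         stripped = line.strip()
--
--         if in_imports and (stripped.startswith("import ") or stripped.startswith("from ")):
--             imports.append(line)
--         elif in_imports and stripped and not stripped.startswith("#"):
--             if stripped.startswith('"""') or stripped.startswith("'''"):
--                 # Docstring - part of body
--                 in_imports = False
--                 body_lines.append(line)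
--             elif stripped:
--                 in_imports = False
--                 body_lines.append(line)
--             else:
--                 body_lines.append(line)
--         else:
--             body_lines.append(line)
--
--     return imports, "\n".join(body_lines)
-- ===== SOURCE B (Python) =====
-- def _extract_imports_py(content: str) -> tuple[list[str], str]:
--     """Extract import statements from Python."""
--     lines = content.split("\n")
--
--     def is_import(line):
--         s = line.strip()
--         return s.startswith("import ") or s.startswith("from ")
--
--     def is_passive(line):
--         s = line.strip()
--         return not s or s.startswith("#")
--
--     # first real code line ends the import header; default: no code line
--     split = len(lines)
--     for i, line in enumerate(lines):
--         if not is_import(line) and not is_passive(line):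
--             split = i
--             break
--
--     head = lines[:split]
--     imports = [line for line in head if is_import(line)]
--     body_lines = [line for line in head if not is_import(line)] + lines[split:]
--     return imports, "\n".join(body_lines)
-- ===== Notes on version B (the rewrite author's own statement) =====
-- stated objective: alternative
-- what changed: Replaces the single stateful loop with a mutating in_imports flag by an explicit two-phase decomposition: first find the split index (the first real code line), then classify only the prefix with two filters and append the whole suffix to the body.
import Mathlib
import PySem

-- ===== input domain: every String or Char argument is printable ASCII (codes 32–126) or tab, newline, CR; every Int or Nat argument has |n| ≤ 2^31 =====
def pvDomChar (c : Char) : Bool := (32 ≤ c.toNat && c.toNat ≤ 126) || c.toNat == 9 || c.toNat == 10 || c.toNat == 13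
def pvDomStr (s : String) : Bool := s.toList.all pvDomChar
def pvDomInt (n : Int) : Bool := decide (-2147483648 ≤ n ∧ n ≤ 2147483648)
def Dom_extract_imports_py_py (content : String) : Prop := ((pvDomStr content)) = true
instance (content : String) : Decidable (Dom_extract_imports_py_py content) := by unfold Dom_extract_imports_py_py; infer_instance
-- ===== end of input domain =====

-- B replaces A's stateful flag loop by a two-phase decomposition (find split index, then filter
-- the prefix); same cost, proved to return the same value on every input.

-- ===== PORT A =====
-- literal transliteration of A's for-loop over (imports, body_lines, in_imports)
def extract_imports_py_py (content : String) : List String × String :=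
  let lines := (PySem.Str.split? content "\n").getD []
  let st := lines.foldl (fun (st : List String × List String × Bool) line =>
    let imports := st.1
    let body_lines := st.2.1
    let in_imports := st.2.2
    let stripped := PySem.Str.strip line
    if in_imports && (PySem.Str.startswith stripped "import " || PySem.Str.startswith stripped "from ") then
      (imports ++ [line], body_lines, in_imports)
    else if in_imports && !(stripped == "") && !PySem.Str.startswith stripped "#" then
      if PySem.Str.startswith stripped "\"\"\"" || PySem.Str.startswith stripped "'''" then
        (imports, body_lines ++ [line], false)
      else if !(stripped == "") then
        (imports, body_lines ++ [line], false)
      else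
        (imports, body_lines ++ [line], in_imports)
    else
      (imports, body_lines ++ [line], in_imports)) ([], [], true)
  (st.1, PySem.Str.join "\n" st.2.1)

-- ===== PORT B =====
def pvIsImport (line : String) : Bool :=
  let s := PySem.Str.strip line
  PySem.Str.startswith s "import " || PySem.Str.startswith s "from "

def pvIsPassive (line : String) : Bool :=
  let s := PySem.Str.strip line
  s == "" || PySem.Str.startswith s "#"

-- Source B's search loop (for … if … break) as structural recursion
def pvFindSplit : List String → Nat
  | [] => 0
  | line :: rest =>
    if !pvIsImport line && !pvIsPassive line then 0 else pvFindSplit rest + 1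

def extract_imports_py_py_alt (content : String) : List String × String :=
  let lines := (PySem.Str.split? content "\n").getD []
  let split := pvFindSplit lines
  let head := lines.take split
  let imports := head.filter (fun line => pvIsImport line)
  let body_lines := head.filter (fun line => !pvIsImport line) ++ lines.drop split
  (imports, PySem.Str.join "\n" body_lines)

-- ===== PRECONDITION & SPEC =====
def Spec_extract_imports_py_py (content : String) (out : List String × String) : Prop := out = extract_imports_py_py_alt content
instance (content : String) (out : List String × String) : Decidable (Spec_extract_imports_py_py content out) := by unfold Spec_extract_imports_py_py; infer_instance

-- ===== CLAIM (what is proved, stated in full; the proofs are below) =====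
def Claim_equal_extract_imports_py_py : Prop := ∀ (content : String), Dom_extract_imports_py_py content → Spec_extract_imports_py_py content (extract_imports_py_py content)

-- ===== LEMMAS AND PROOFS =====

-- A's loop body, named for the proofs (definitionally the lambda in the port)
def pvStepA (st : List String × List String × Bool) (line : String) : List String × List String × Bool :=
  let imports := st.1
  let body_lines := st.2.1
  let in_imports := st.2.2
  let stripped := PySem.Str.strip line
  if in_imports && (PySem.Str.startswith stripped "import " || PySem.Str.startswith stripped "from ") then
    (imports ++ [line], body_lines, in_imports)
  else if in_imports && !(stripped == "") && !PySem.Str.startswith stripped "#" then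
    if PySem.Str.startswith stripped "\"\"\"" || PySem.Str.startswith stripped "\'\'\'" then
      (imports, body_lines ++ [line], false)
    else if !(stripped == "") then
      (imports, body_lines ++ [line], false)
    else
      (imports, body_lines ++ [line], in_imports)
  else
    (imports, body_lines ++ [line], in_imports)

-- with a true flag, A's step classifies a line exactly by B's two predicates
theorem pvStepA_eq_true (imps body : List String) (l : String) :
    pvStepA (imps, body, true) l =
      if pvIsImport l then (imps ++ [l], body, true)
      else if pvIsPassive l then (imps, body ++ [l], true)
      else (imps, body ++ [l], false) := by
  simp only [pvStepA, pvIsImport, pvIsPassive]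
  rcases Bool.eq_false_or_eq_true (PySem.Str.startswith (PySem.Str.strip l) "import ") with h1 | h1 <;>
  rcases Bool.eq_false_or_eq_true (PySem.Str.startswith (PySem.Str.strip l) "from ") with h2 | h2 <;>
  rcases Bool.eq_false_or_eq_true (PySem.Str.strip l == "") with h3 | h3 <;>
  rcases Bool.eq_false_or_eq_true (PySem.Str.startswith (PySem.Str.strip l) "#") with h4 | h4 <;>
    simp_all

-- once the flag is false, everything is appended to the body
theorem pvFoldA_false (lines : List String) (imps body : List String) :
    lines.foldl pvStepA (imps, body, false) = (imps, body ++ lines, false) := by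
  induction lines generalizing body with
  | nil => simp
  | cons l rest ih =>
    have hstep : pvStepA (imps, body, false) l = (imps, body ++ [l], false) := by
      simp [pvStepA]
    simp [List.foldl_cons, hstep, ih]

-- main invariant: A's fold from a true flag realises B's split/filter decomposition
theorem pvFoldA_true (lines : List String) (imps body : List String) :
    (lines.foldl pvStepA (imps, body, true)).1 =
      imps ++ (lines.take (pvFindSplit lines)).filter (fun l => pvIsImport l) ∧
    (lines.foldl pvStepA (imps, body, true)).2.1 =
      body ++ (lines.take (pvFindSplit lines)).filter (fun l => !pvIsImport l)
           ++ lines.drop (pvFindSplit lines) := by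
  induction lines generalizing imps body with
  | nil => simp [pvFindSplit]
  | cons l rest ih =>
    rw [List.foldl_cons, pvStepA_eq_true]
    by_cases himp : pvIsImport l = true
    · have hsplit : pvFindSplit (l :: rest) = pvFindSplit rest + 1 := by
        simp [pvFindSplit, himp]
      obtain ⟨ih1, ih2⟩ := ih (imps ++ [l]) body
      simp [himp, hsplit, ih1, ih2]
    · by_cases hpas : pvIsPassive l = true
      · have hsplit : pvFindSplit (l :: rest) = pvFindSplit rest + 1 := by
          simp [pvFindSplit, hpas]
        obtain ⟨ih1, ih2⟩ := ih imps (body ++ [l])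
        simp [himp, hpas, hsplit, ih1, ih2]
      · have hsplit : pvFindSplit (l :: rest) = 0 := by
          simp [pvFindSplit, himp, hpas]
        simp [himp, hpas, hsplit, pvFoldA_false]

-- ===== VERDICT (by name: the statement is the Claim_ definition above) =====
theorem extract_imports_py_py_spec : Claim_equal_extract_imports_py_py := by
  intro content _
  show extract_imports_py_py content = extract_imports_py_py_alt content
  obtain ⟨h1, h2⟩ := pvFoldA_true ((PySem.Str.split? content "\n").getD []) [] []
  simp only [List.nil_append] at h1 h2
  have eA : extract_imports_py_py content =
      ((((PySem.Str.split? content "\n").getD []).foldl pvStepA ([], [], true)).1,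
       PySem.Str.join "\n" ((((PySem.Str.split? content "\n").getD []).foldl pvStepA ([], [], true)).2.1)) := rfl
  rw [eA, h1, h2]
  rfl
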